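-- pv_equiv track=rewrite | github.com/Csun1992/MoleculeClassification | discriminantAnal.py | splitTrainDat
-- ===== SOURCE A (Python) =====
-- def splitTrainDat(train, groupNum):
--     group1 = []
--     group2 = []
--     group3 = []
--     for i in map(int, train):
--         if groupNum[i] == 1:
--             group1.append(i)
--         elif groupNum[i] == 2:
--             group2.append(i)
--         else:
--             group3.append(i)
--     return (group1, group2, group3)
-- ===== SOURCE B (Python) =====
-- def splitTrainDat(train, groupNum):
--     t = list(map(int, train))
--
--     def bkey(i):
--         g = groupNum[i]
--         return 1 if g == 1 else (2 if g == 2 else 3)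
--
--     s = sorted(t, key=bkey)          # stable sort gathers each group, preserving order
--     c1 = len([i for i in t if bkey(i) == 1])
--     c2 = len([i for i in t if bkey(i) == 2])
--     return (s[:c1], s[c1:c1 + c2], s[c1 + c2:])
-- ===== Notes on version B (the rewrite author's own statement) =====
-- stated objective: alternative
-- what changed: Replaces the single branching append loop with a stable sort of the indices by a 1/2/3 group key followed by slicing the sorted list at the two group-count boundaries (stability preserves A's within-group order).
import Mathlib
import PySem

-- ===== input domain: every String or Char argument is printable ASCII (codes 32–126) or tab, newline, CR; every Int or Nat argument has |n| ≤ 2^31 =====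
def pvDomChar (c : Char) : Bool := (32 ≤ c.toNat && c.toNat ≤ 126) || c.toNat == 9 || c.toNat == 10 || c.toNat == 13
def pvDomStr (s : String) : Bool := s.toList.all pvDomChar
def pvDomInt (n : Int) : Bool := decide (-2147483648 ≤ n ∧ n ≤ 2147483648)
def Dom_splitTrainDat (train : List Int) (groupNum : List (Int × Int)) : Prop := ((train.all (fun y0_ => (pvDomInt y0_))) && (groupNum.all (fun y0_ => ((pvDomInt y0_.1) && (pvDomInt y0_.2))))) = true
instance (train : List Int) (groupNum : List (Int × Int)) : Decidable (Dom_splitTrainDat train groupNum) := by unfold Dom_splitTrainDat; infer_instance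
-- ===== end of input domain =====

-- B replaces A's single branching append loop by a stable sort on a 1/2/3 group key
-- followed by slicing at the two group-count boundaries (alternative algorithm).

-- ===== PORT A =====
-- A's loop body: dict lookup groupNum[i], then the if/elif/else appends. The 'none'
-- branch is unreachable under Pre_ (Python raises KeyError there).
def pvStepA (d : PySem.Dict Int Int) (acc : List Int × List Int × List Int) (i : Int) :
    List Int × List Int × List Int :=
  match PySem.Dict.get? d i with
  | some v =>
      if v == 1 then (acc.1 ++ [i], acc.2.1, acc.2.2)
      else if v == 2 then (acc.1, acc.2.1 ++ [i], acc.2.2)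
      else (acc.1, acc.2.1, acc.2.2 ++ [i])
  | none => acc

def splitTrainDat (train : List Int) (groupNum : List (Int × Int)) : List Int × List Int × List Int :=
  train.foldl (pvStepA (PySem.Dict.ofList groupNum)) ([], [], [])

-- ===== PORT B =====
-- Source B's bkey: group key 1/2/3 for an index. The 'none' branch is unreachable under
-- Pre_ (Python raises KeyError there).
def pvBKey (d : PySem.Dict Int Int) (i : Int) : Int :=
  match PySem.Dict.get? d i with
  | some v => if v == 1 then 1 else if v == 2 then 2 else 3
  | none => 3

def splitTrainDat_alt (train : List Int) (groupNum : List (Int × Int)) : List Int × List Int × List Int :=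
  let d := PySem.Dict.ofList groupNum
  let t := train
  let s := PySem.List.sorted t (pvBKey d) false
  let c1 : Int := ((t.filter (fun i => pvBKey d i == 1)).length : Int)
  let c2 : Int := ((t.filter (fun i => pvBKey d i == 2)).length : Int)
  (PySem.List.slice s none (some c1),
   PySem.List.slice s (some c1) (some (c1 + c2)),
   PySem.List.slice s (some (c1 + c2)) none)

-- ===== PRECONDITION & SPEC =====
-- Pre_ excludes exactly the inputs where Python A raises KeyError: some index in
-- train is not a key of the dict groupNum (B's Python raises there too).
def Pre_splitTrainDat (train : List Int) (groupNum : List (Int × Int)) : Prop :=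
  ∀ i ∈ train, (PySem.Dict.get? (PySem.Dict.ofList groupNum) i).isSome = true
instance (train : List Int) (groupNum : List (Int × Int)) : Decidable (Pre_splitTrainDat train groupNum) := by unfold Pre_splitTrainDat; infer_instance
def pvWitness_splitTrainDat : List Int × (List (Int × Int)) := ([0, 2, 1, 0], [(0, 1), (1, 2), (2, 7)])

def Spec_splitTrainDat (train : List Int) (groupNum : List (Int × Int)) (out : List Int × List Int × List Int) : Prop := out = splitTrainDat_alt train groupNum
instance (train : List Int) (groupNum : List (Int × Int)) (out : List Int × List Int × List Int) : Decidable (Spec_splitTrainDat train groupNum out) := by unfold Spec_splitTrainDat; infer_instance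

-- ===== CLAIM (what is proved, stated in full; the proofs are below) =====
def Claim_equal_splitTrainDat : Prop := ∀ (train : List Int) (groupNum : List (Int × Int)), Dom_splitTrainDat train groupNum → Pre_splitTrainDat train groupNum → Spec_splitTrainDat train groupNum (splitTrainDat train groupNum)

-- ===== LEMMAS AND PROOFS =====

theorem pvBKey_cases (d : PySem.Dict Int Int) (i : Int) :
    pvBKey d i = 1 ∨ pvBKey d i = 2 ∨ pvBKey d i = 3 := by
  unfold pvBKey
  cases PySem.Dict.get? d i with
  | none => simp
  | some v => by_cases h1 : v = 1 <;> by_cases h2 : v = 2 <;> simp [h1, h2]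

theorem insertBy_nil {α : Type} (before : α → α → Bool) (x : α) :
    PySem.List.insertBy before x [] = [x] := rfl

theorem insertBy_cons {α : Type} (before : α → α → Bool) (x y : α) (ys : List α) :
    PySem.List.insertBy before x (y :: ys) =
      if before x y then x :: y :: ys else y :: PySem.List.insertBy before x ys := rfl

-- x skips over a block in which 'before x' never fires
theorem insertBy_skip {α : Type} (before : α → α → Bool) (x : α) :
    ∀ (l1 l2 : List α), (∀ y ∈ l1, before x y = false) →
      PySem.List.insertBy before x (l1 ++ l2) = l1 ++ PySem.List.insertBy before x l2 := by
  intro l1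
  induction l1 with
  | nil => intro l2 _; simp
  | cons y ys ih =>
      intro l2 h
      have hy : before x y = false := h y (by simp)
      simp [insertBy_cons, hy, ih l2 (fun z hz => h z (by simp [hz]))]

-- x lands in front of a block whose head (if any) satisfies 'before x'
theorem insertBy_front {α : Type} (before : α → α → Bool) (x : α) (l : List α)
    (h : ∀ y ∈ l, before x y = true) :
    PySem.List.insertBy before x l = x :: l := by
  cases l with
  | nil => rfl
  | cons y ys => simp [insertBy_cons, h y (by simp)]

-- Loop invariant for the insertion sort: starting from three ordered blocks with
-- keys 1, 2, 3, the fold extends each block by the matching filtered sublist.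
theorem pv_fold_ins (d : PySem.Dict Int Int) :
    ∀ (t A B C : List Int),
      (∀ a ∈ A, pvBKey d a = 1) → (∀ b ∈ B, pvBKey d b = 2) → (∀ c ∈ C, pvBKey d c = 3) →
      t.foldl (fun acc x => PySem.List.insertBy
          (fun a b => decide (pvBKey d a < pvBKey d b)) x acc) (A ++ B ++ C) =
        (A ++ t.filter (fun i => pvBKey d i == 1)) ++
        (B ++ t.filter (fun i => pvBKey d i == 2)) ++
        (C ++ t.filter (fun i => pvBKey d i == 3)) := by
  intro t
  induction t with
  | nil => intro A B C _ _ _; simp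
  | cons x xs ih =>
      intro A B C hA hB hC
      simp only [List.foldl_cons, List.filter_cons]
      rcases pvBKey_cases d x with hx | hx | hx
      · have hskip : ∀ y ∈ A, (decide (pvBKey d x < pvBKey d y)) = false := by
          intro y hy; simp [hx, hA y hy]
        have hfront : ∀ y ∈ B ++ C, (decide (pvBKey d x < pvBKey d y)) = true := by
          intro y hy
          rcases List.mem_append.mp hy with h | h
          · simp [hx, hB y h]
          · simp [hx, hC y h]
        rw [List.append_assoc, insertBy_skip _ _ _ _ hskip, insertBy_front _ _ _ hfront]
        have heq := ih (A ++ [x]) B C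
          (by intro a ha; rcases List.mem_append.mp ha with h | h
              · exact hA a h
              · simp at h; simpa [h] using hx)
          hB hC
        simp only [List.append_assoc, List.cons_append, List.nil_append] at heq
        rw [heq]
        simp [hx]
      · have hskipA : ∀ y ∈ A, (decide (pvBKey d x < pvBKey d y)) = false := by
          intro y hy; simp [hx, hA y hy]
        have hskipB : ∀ y ∈ B, (decide (pvBKey d x < pvBKey d y)) = false := by
          intro y hy; simp [hx, hB y hy]
        have hfront : ∀ y ∈ C, (decide (pvBKey d x < pvBKey d y)) = true := by
          intro y hy; simp [hx, hC y hy]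
        rw [List.append_assoc, insertBy_skip _ _ _ _ hskipA,
            insertBy_skip _ _ _ _ hskipB, insertBy_front _ _ _ hfront]
        have heq := ih A (B ++ [x]) C hA
          (by intro b hb; rcases List.mem_append.mp hb with h | h
              · exact hB b h
              · simp at h; simpa [h] using hx)
          hC
        simp only [List.append_assoc, List.cons_append, List.nil_append] at heq
        rw [heq]
        simp [hx]
      · have hskip : ∀ y ∈ A ++ B ++ C, (decide (pvBKey d x < pvBKey d y)) = false := by
          intro y hy
          rcases List.mem_append.mp hy with h | h
          · rcases List.mem_append.mp h with h' | h'
            · simp [hx, hA y h']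
            · simp [hx, hB y h']
          · simp [hx, hC y h]
        rw [← List.append_nil (A ++ B ++ C), insertBy_skip _ _ _ _ hskip, insertBy_nil]
        have heq := ih A B (C ++ [x]) hA hB
          (by intro c hc; rcases List.mem_append.mp hc with h | h
              · exact hC c h
              · simp at h; simpa [h] using hx)
        simp only [List.append_assoc] at heq ⊢
        rw [heq]
        simp [hx]

-- The stable insertion sort gathers the three groups in key order, within-group order preserved.
theorem pv_sorted_eq (d : PySem.Dict Int Int) (t : List Int) :
    PySem.List.sorted t (pvBKey d) false =
      t.filter (fun i => pvBKey d i == 1) ++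
      t.filter (fun i => pvBKey d i == 2) ++
      t.filter (fun i => pvBKey d i == 3) := by
  have := pv_fold_ins d t [] [] []
    (by intro a h; simp at h) (by intro b h; simp at h) (by intro c h; simp at h)
  simpa [PySem.List.sorted] using this

-- A's fold, characterized by the same three filters (under Pre_, every lookup succeeds).
theorem pv_fold_split (d : PySem.Dict Int Int) :
    ∀ (t g1 g2 g3 : List Int), (∀ i ∈ t, (PySem.Dict.get? d i).isSome = true) →
    t.foldl (pvStepA d) (g1, g2, g3) =
      (g1 ++ t.filter (fun i => pvBKey d i == 1),
       g2 ++ t.filter (fun i => pvBKey d i == 2),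
       g3 ++ t.filter (fun i => pvBKey d i == 3)) := by
  intro t
  induction t with
  | nil => intro g1 g2 g3 _; simp
  | cons x xs ih =>
      intro g1 g2 g3 h
      have hx : (PySem.Dict.get? d x).isSome = true := h x (by simp)
      obtain ⟨v, hv⟩ := Option.isSome_iff_exists.mp hx
      have hxs : ∀ i ∈ xs, (PySem.Dict.get? d i).isSome = true :=
        fun i hi => h i (by simp [hi])
      simp only [List.foldl_cons, List.filter_cons]
      by_cases h1 : v = 1
      · subst h1
        simp [pvStepA, pvBKey, hv, ih _ _ _ hxs]
      · by_cases h2 : v = 2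
        · subst h2
          simp [pvStepA, pvBKey, hv, ih _ _ _ hxs]
        · simp [pvStepA, pvBKey, hv, h1, h2, ih _ _ _ hxs]

-- ===== VERDICT (by name: the statement is the Claim_ definition above) =====
theorem splitTrainDat_spec : Claim_equal_splitTrainDat := by
  intro train groupNum _ hpre
  unfold Spec_splitTrainDat splitTrainDat splitTrainDat_alt
  dsimp only
  set d := PySem.Dict.ofList groupNum with hd
  set f1 := train.filter (fun i => pvBKey d i == 1) with hf1
  set f2 := train.filter (fun i => pvBKey d i == 2) with hf2
  set f3 := train.filter (fun i => pvBKey d i == 3) with hf3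
  have hs : PySem.List.sorted train (pvBKey d) false = f1 ++ f2 ++ f3 := pv_sorted_eq d train
  have hA : train.foldl (pvStepA d) ([], [], []) = (f1, f2, f3) := by
    simpa using pv_fold_split d train [] [] [] hpre
  rw [hA, hs]
  have e1 : PySem.List.slice (f1 ++ f2 ++ f3) none (some ((f1.length : Nat) : Int)) = f1 := by
    rw [PySem.List.slice_to_natCast]
    simp [List.append_assoc]
  have e2 : PySem.List.slice (f1 ++ f2 ++ f3) (some ((f1.length : Nat) : Int))
      (some (((f1.length : Nat) : Int) + ((f2.length : Nat) : Int))) = f2 := by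
    rw [PySem.List.slice_natCast_add]
    simp [List.append_assoc]
  have e3 : PySem.List.slice (f1 ++ f2 ++ f3)
      (some (((f1.length : Nat) : Int) + ((f2.length : Nat) : Int))) none = f3 := by
    have : ((f1.length : Nat) : Int) + ((f2.length : Nat) : Int)
        = (((f1.length + f2.length : Nat)) : Int) := by push_cast; ring
    rw [this, PySem.List.slice_from_natCast]
    have : f1 ++ f2 ++ f3 = (f1 ++ f2) ++ f3 := by simp [List.append_assoc]
    rw [this]
    simp
  simp only [e1, e2, e3]
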